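-- pv_equiv track=rewrite | github.com/andrejwilczek/NLP_seq2seq | create_dialogue_dataset.py | create_subset
-- ===== SOURCE A (Python) =====
-- def create_subset(sentences, history, eos_tag):
--
--     dataset = list()
--     three_prev_sentence = 'EOS '
--     two_prev_sentence = 'EOS '
--     prev_sentence = 'EOS '
--
--     if history:
--         if eos_tag:
--             for sentence in sentences:
--                 sentence = sentence.replace(".", " . EOS").replace(
--                     ",", " , ").replace("?", " ? EOS").replace("!", " ! EOS")
--
--                 input_seq = three_prev_sentence + \
--                     two_prev_sentence + prev_sentence
--                 target_seq = sentence
--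
--                 input_seq = " ".join(input_seq.split())
--                 target_seq = " ".join(target_seq.split())
--
--                 dataset.append([input_seq, target_seq])
--                 three_prev_sentence = two_prev_sentence
--                 two_prev_sentence = prev_sentence
--                 prev_sentence = sentence
--         else:
--             for sentence in sentences:
--                 sentence = sentence.replace(".", " . ").replace(
--                     ",", " , ").replace("?", " ? ").replace("!", " ! ")
--
--                 input_seq = three_prev_sentence + \
--                     two_prev_sentence + prev_sentence
--                 target_seq = sentence
--
--                 input_seq = " ".join(input_seq.split())
--                 target_seq = " ".join(target_seq.split())
--
--                 dataset.append([input_seq, target_seq])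
--                 three_prev_sentence = two_prev_sentence
--                 two_prev_sentence = prev_sentence
--                 prev_sentence = sentence
--     else:
--         if eos_tag:
--             for sentence in sentences:
--                 sentence = sentence.replace(".", " . EOS").replace(
--                     ",", " ,").replace("?", " ? EOS").replace("!", " ! EOS")
--                 sentence = " ".join(sentence.split())
--
--                 dataset.append([prev_sentence, sentence])
--                 prev_sentence = sentence
--
--         else:
--             for sentence in sentences:
--                 sentence = sentence.replace(".", " . ").replace(
--                     ",", " ,").replace("?", " ? ").replace("!", " ! ")
--                 sentence = " ".join(sentence.split())
--
--                 dataset.append([prev_sentence, sentence])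
--                 prev_sentence = sentence
--     return dataset
-- ===== SOURCE B (Python) =====
-- def create_subset(sentences, history, eos_tag):
--     # Table-driven single-scan cleaner (one char-lookup pass instead of four
--     # chained .replace passes) + stateless indexed pairing built back-to-front.
--     eos = " EOS" if eos_tag else " "
--     table = {".": " ." + eos, "?": " ?" + eos, "!": " !" + eos,
--              ",": " , " if history else " ,"}
--     cleaned = ["".join(table.get(ch, ch) for ch in s) for s in sentences]
--
--     def norm(s):
--         return " ".join(s.split())
--
--     def ctx(j):  # history context piece; "EOS " pads positions before the start
--         return "EOS " if j < 0 else cleaned[j]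
--
--     out = []
--     for i in range(len(cleaned) - 1, -1, -1):
--         if history:
--             out.append([norm(ctx(i - 3) + ctx(i - 2) + ctx(i - 1)),
--                         norm(cleaned[i])])
--         else:
--             out.append([norm(cleaned[i - 1]) if i > 0 else "EOS ",
--                         norm(cleaned[i])])
--     out.reverse()
--     return out
-- ===== Notes on version B (the rewrite author's own statement) =====
-- stated objective: alternative
-- what changed: Replaces A's four duplicated stateful loops (rolling previous-sentence variables, four chained .replace passes per sentence) by a table-driven single character-scan cleaner and a stateless index-based pairing loop that builds the output back-to-front over a descending range and reverses it.
import Mathlib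
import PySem

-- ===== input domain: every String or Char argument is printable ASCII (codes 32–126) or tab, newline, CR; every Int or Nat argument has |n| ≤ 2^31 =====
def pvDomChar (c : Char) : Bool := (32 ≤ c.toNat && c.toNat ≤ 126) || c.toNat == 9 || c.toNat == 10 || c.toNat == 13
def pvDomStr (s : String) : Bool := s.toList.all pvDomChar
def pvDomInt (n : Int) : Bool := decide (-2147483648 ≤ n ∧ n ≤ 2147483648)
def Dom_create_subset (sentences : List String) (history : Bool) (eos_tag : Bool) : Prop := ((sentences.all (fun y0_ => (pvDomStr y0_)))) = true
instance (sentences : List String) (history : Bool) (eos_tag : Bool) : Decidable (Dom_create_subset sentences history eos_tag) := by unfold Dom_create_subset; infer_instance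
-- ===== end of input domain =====

-- B replaces A's four duplicated stateful loops (rolling previous-sentence variables, four chained
-- .replace passes per sentence) by a table-driven single character-scan cleaner plus a stateless
-- index-based pairing loop built back-to-front and reversed; objective: alternative (same cost).

-- ===== PORT A =====
def create_subset (sentences : List String) (history : Bool) (eos_tag : Bool) : List (List String) :=
  let dataset : List (List String) := []
  let three_prev_sentence := "EOS "
  let two_prev_sentence := "EOS "
  let prev_sentence := "EOS "
  if history then
    if eos_tag then
      (sentences.foldl (fun (st : List (List String) × String × String × String) sentence =>
        let sentence := PySem.Str.replace (PySem.Str.replace (PySem.Str.replace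
          (PySem.Str.replace sentence "." " . EOS") "," " , ") "?" " ? EOS") "!" " ! EOS"
        let input_seq := st.2.1 ++ st.2.2.1 ++ st.2.2.2
        let target_seq := sentence
        let input_seq := PySem.Str.join " " (PySem.Str.split₀ input_seq)
        let target_seq := PySem.Str.join " " (PySem.Str.split₀ target_seq)
        (st.1 ++ [[input_seq, target_seq]], st.2.2.1, st.2.2.2, sentence))
        (dataset, three_prev_sentence, two_prev_sentence, prev_sentence)).1
    else
      (sentences.foldl (fun (st : List (List String) × String × String × String) sentence =>
        let sentence := PySem.Str.replace (PySem.Str.replace (PySem.Str.replace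
          (PySem.Str.replace sentence "." " . ") "," " , ") "?" " ? ") "!" " ! "
        let input_seq := st.2.1 ++ st.2.2.1 ++ st.2.2.2
        let target_seq := sentence
        let input_seq := PySem.Str.join " " (PySem.Str.split₀ input_seq)
        let target_seq := PySem.Str.join " " (PySem.Str.split₀ target_seq)
        (st.1 ++ [[input_seq, target_seq]], st.2.2.1, st.2.2.2, sentence))
        (dataset, three_prev_sentence, two_prev_sentence, prev_sentence)).1
  else
    if eos_tag then
      (sentences.foldl (fun (st : List (List String) × String) sentence =>
        let sentence := PySem.Str.replace (PySem.Str.replace (PySem.Str.replace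
          (PySem.Str.replace sentence "." " . EOS") "," " ,") "?" " ? EOS") "!" " ! EOS"
        let sentence := PySem.Str.join " " (PySem.Str.split₀ sentence)
        (st.1 ++ [[st.2, sentence]], sentence))
        (dataset, prev_sentence)).1
    else
      (sentences.foldl (fun (st : List (List String) × String) sentence =>
        let sentence := PySem.Str.replace (PySem.Str.replace (PySem.Str.replace
          (PySem.Str.replace sentence "." " . ") "," " ,") "?" " ? ") "!" " ! "
        let sentence := PySem.Str.join " " (PySem.Str.split₀ sentence)
        (st.1 ++ [[st.2, sentence]], sentence))
        (dataset, prev_sentence)).1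

-- ===== PORT B =====
-- Source B's table.get(ch, ch): one replacement table, keyed by the character
-- (" ." + eos etc. are written as the resulting literals)
def csTable (history : Bool) (eos_tag : Bool) (ch : Char) : List Char :=
  if ch = '.' then (if eos_tag then " . EOS" else " . ").toList
  else if ch = '?' then (if eos_tag then " ? EOS" else " ? ").toList
  else if ch = '!' then (if eos_tag then " ! EOS" else " ! ").toList
  else if ch = ',' then (if history then " , " else " ,").toList
  else [ch]

-- Source B's "".join(table.get(ch, ch) for ch in s): single scan over the characters
def csClean (history : Bool) (eos_tag : Bool) (s : String) : String :=
  String.ofList (s.toList.flatMap (csTable history eos_tag))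

-- Source B's norm(s) = " ".join(s.split())
def csNorm (s : String) : String := PySem.Str.join " " (PySem.Str.split₀ s)

-- Source B's ctx(j): "EOS " pads positions before the start; the index is in range whenever B uses it
def csCtx (cleaned : List String) (j : Int) : String :=
  if j < 0 then "EOS " else PySem.List.pyGetD cleaned j ""

def create_subset_alt (sentences : List String) (history : Bool) (eos_tag : Bool) : List (List String) :=
  let cleaned := sentences.map (csClean history eos_tag)
  let out := (PySem.List.pyRange ((cleaned.length : Int) - 1) (-1) (-1)).foldl
    (fun acc i =>
      acc ++ [if history then
          [csNorm (csCtx cleaned (i - 3) ++ csCtx cleaned (i - 2) ++ csCtx cleaned (i - 1)),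
           csNorm (PySem.List.pyGetD cleaned i "")]
        else
          [if 0 < i then csNorm (PySem.List.pyGetD cleaned (i - 1) "") else "EOS ",
           csNorm (PySem.List.pyGetD cleaned i "")]]) []
  out.reverse

-- ===== PRECONDITION & SPEC =====
def Spec_create_subset (sentences : List String) (history : Bool) (eos_tag : Bool) (out : List (List String)) : Prop := out = create_subset_alt sentences history eos_tag
instance (sentences : List String) (history : Bool) (eos_tag : Bool) (out : List (List String)) : Decidable (Spec_create_subset sentences history eos_tag out) := by unfold Spec_create_subset; infer_instance

-- ===== CLAIM (what is proved, stated in full; the proofs are below) =====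
def Claim_equal_create_subset : Prop := ∀ (sentences : List String) (history : Bool) (eos_tag : Bool), Dom_create_subset sentences history eos_tag → Spec_create_subset sentences history eos_tag (create_subset sentences history eos_tag)

-- ===== LEMMAS AND PROOFS =====

-- Python str.replace with a one-character pattern is a per-character expansion.
theorem replace_go_single (c : Char) (new : List Char) :
    ∀ (l : List Char) (fuel : Nat), l.length ≤ fuel → ∀ (acc : List Char),
    PySem.Chars.replace.go [c] new fuel l acc
      = acc.reverse ++ l.flatMap (fun ch => if ch = c then new else [ch]) := by
  intro l
  induction l with
  | nil => intro fuel _ acc; cases fuel <;> simp [PySem.Chars.replace.go]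
  | cons x t ih =>
    intro fuel hf acc
    cases fuel with
    | zero => simp at hf
    | succ f =>
      rw [PySem.Chars.replace.go]
      have hlen : t.length ≤ f := Nat.le_of_succ_le_succ (by simpa using hf)
      by_cases hx : x = c
      · subst hx
        have hpre : [x].isPrefixOf (x :: t) = true := by simp [List.isPrefixOf]
        rw [hpre]
        simp only [if_true, List.length_cons, List.length_nil, Nat.zero_add, List.drop_one,
          List.tail_cons]
        rw [ih f hlen]
        simp
      · have hcx : c ≠ x := fun h => hx h.symm
        have hpre : [c].isPrefixOf (x :: t) = false := by
          simp [List.isPrefixOf, hcx]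
        rw [hpre]
        simp only [Bool.false_eq_true, if_false]
        rw [ih f hlen]
        simp [hx]

theorem chars_replace_single (cs : List Char) (c : Char) (r : List Char) :
    PySem.Chars.replace cs [c] r = cs.flatMap (fun ch => if ch = c then r else [ch]) := by
  simpa [PySem.Chars.replace] using replace_go_single c r cs cs.length le_rfl []

-- The four chained single-character replaces compose into B's one lookup table.
theorem table_compose (h e : Bool) (ch : Char) :
    List.flatMap (fun a =>
        List.flatMap (fun b =>
            List.flatMap (fun c =>
                if c = '!' then (if e then " ! EOS" else " ! ").toList else [c])
              (if b = '?' then (if e then " ? EOS" else " ? ").toList else [b]))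
          (if a = ',' then (if h then " , " else " ,").toList else [a]))
      (if ch = '.' then (if e then " . EOS" else " . ").toList else [ch])
      = csTable h e ch := by
  by_cases h1 : ch = '.'
  · subst h1; cases h <;> cases e <;> decide
  by_cases h2 : ch = ','
  · subst h2; cases h <;> cases e <;> decide
  by_cases h3 : ch = '?'
  · subst h3; cases h <;> cases e <;> decide
  by_cases h4 : ch = '!'
  · subst h4; cases h <;> cases e <;> decide
  simp [csTable, h1, h2, h3, h4]

-- A's per-sentence replace chain equals B's single-scan cleaner (list level).
theorem chain_eq_chars (h e : Bool) (cs : List Char) :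
    PySem.Chars.replace (PySem.Chars.replace (PySem.Chars.replace (PySem.Chars.replace cs
        ("." : String).toList (if e then " . EOS" else " . ").toList)
        ("," : String).toList (if h then " , " else " ,").toList)
        ("?" : String).toList (if e then " ? EOS" else " ? ").toList)
        ("!" : String).toList (if e then " ! EOS" else " ! ").toList
      = cs.flatMap (csTable h e) := by
  have hd : ("." : String).toList = ['.'] := rfl
  have hc : ("," : String).toList = [','] := rfl
  have hq : ("?" : String).toList = ['?'] := rfl
  have hx : ("!" : String).toList = ['!'] := rfl
  rw [hd, hc, hq, hx, chars_replace_single, chars_replace_single, chars_replace_single,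
    chars_replace_single]
  simp only [List.flatMap_assoc]
  exact congrArg (fun f => List.flatMap f cs) (funext (table_compose h e))

-- string-level corollaries, one per flag combination (A's literals per branch)
theorem clean_tt (s : String) :
    PySem.Str.replace (PySem.Str.replace (PySem.Str.replace
        (PySem.Str.replace s "." " . EOS") "," " , ") "?" " ? EOS") "!" " ! EOS"
      = csClean true true s := by
  apply String.toList_inj.mp
  simpa [csClean] using chain_eq_chars true true s.toList

theorem clean_tf (s : String) :
    PySem.Str.replace (PySem.Str.replace (PySem.Str.replace
        (PySem.Str.replace s "." " . ") "," " , ") "?" " ? ") "!" " ! "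
      = csClean true false s := by
  apply String.toList_inj.mp
  simpa [csClean] using chain_eq_chars true false s.toList

theorem clean_ft (s : String) :
    PySem.Str.replace (PySem.Str.replace (PySem.Str.replace
        (PySem.Str.replace s "." " . EOS") "," " ,") "?" " ? EOS") "!" " ! EOS"
      = csClean false true s := by
  apply String.toList_inj.mp
  simpa [csClean] using chain_eq_chars false true s.toList

theorem clean_ff (s : String) :
    PySem.Str.replace (PySem.Str.replace (PySem.Str.replace
        (PySem.Str.replace s "." " . ") "," " ,") "?" " ? ") "!" " ! "
      = csClean false false s := by
  apply String.toList_inj.mp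
  simpa [csClean] using chain_eq_chars false false s.toList

-- A's rolling 3-window loop, characterised by positions in the padded cleaned list.
theorem foldl_hist_idx (cl : String → String) :
    ∀ (m : List String) (acc : List (List String)) (a b c : String),
    (m.foldl (fun (st : List (List String) × String × String × String) s =>
        (st.1 ++ [[csNorm (st.2.1 ++ st.2.2.1 ++ st.2.2.2), csNorm (cl s)]], st.2.2.1, st.2.2.2, cl s))
      (acc, a, b, c)).1
    = acc ++ (List.range m.length).map (fun i =>
        [csNorm ((([a, b, c] ++ m.map cl).getD i "") ++ (([a, b, c] ++ m.map cl).getD (i+1) "")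
            ++ (([a, b, c] ++ m.map cl).getD (i+2) "")),
         csNorm ((m.map cl).getD i "")]) := by
  intro m
  induction m with
  | nil => intro acc a b c; simp
  | cons s rest ih =>
    intro acc a b c
    simp only [List.foldl_cons, List.map_cons, List.length_cons]
    rw [ih]
    rw [List.range_succ_eq_map]
    simp [List.map_map, Function.comp_def, List.getD]

-- A's rolling 1-window loop, characterised by positions in the seeded normalized list.
theorem foldl_nohist_idx (nm : String → String) :
    ∀ (m : List String) (acc : List (List String)) (p : String),
    (m.foldl (fun (st : List (List String) × String) s =>
        (st.1 ++ [[st.2, nm s]], nm s)) (acc, p)).1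
    = acc ++ (List.range m.length).map (fun i =>
        [(p :: m.map nm).getD i "", (m.map nm).getD i ""]) := by
  intro m
  induction m with
  | nil => intro acc p; simp
  | cons s rest ih =>
    intro acc p
    simp only [List.foldl_cons, List.map_cons, List.length_cons]
    rw [ih]
    rw [List.range_succ_eq_map]
    simp [List.map_map, Function.comp_def, List.getD]

-- B's descending-range build-then-reverse is the ascending indexed map.
theorem revloop (n : Nat) (g : Int → List String) :
    ((PySem.List.pyRange ((n : Int) - 1) (-1) (-1)).foldl (fun acc i => acc ++ [g i]) []).reverse
      = (List.range n).map (fun i : Nat => g (i : Int)) := by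
  rw [PySem.List.pyRange_neg_one_eq_reverse]
  rw [show (-1 : Int) + 1 = 0 by ring, show ((n : Int) - 1) + 1 = (n : Int) by ring]
  rw [PySem.List.pyRange_zero_nat]
  rw [PySem.List.foldl_append_singleton_eq_map]
  simp only [List.nil_append, List.map_reverse, List.reverse_reverse, List.map_map,
    Function.comp_def]

-- the padded-list position k is Source B's ctx(k - 3)
theorem ctx_eq (cleaned : List String) (k : Nat) :
    csCtx cleaned ((k : Int) - 3) = (["EOS ", "EOS ", "EOS "] ++ cleaned).getD k "" := by
  unfold csCtx
  match k with
  | 0 => simp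
  | 1 => simp
  | 2 => simp
  | (k+3) =>
    have h1 : ((k + 3 : Nat) : Int) - 3 = (k : Int) := by push_cast; ring
    rw [h1]
    rw [if_neg (by omega)]
    rw [PySem.List.pyGetD_natCast]
    simp [List.getD]

-- per-index bridge: B's normalize-after-lookup is A's lookup in the pre-normalized list
theorem nm_getD (cl : String → String) (m : List String) (i : Nat) (hin : i < m.length) :
    csNorm (PySem.List.pyGetD (m.map cl) (i : Int) "") = (m.map (fun s => csNorm (cl s))).getD i "" := by
  rw [PySem.List.pyGetD_natCast]
  have h1 : i < (m.map cl).length := by simpa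
  have h2 : i < (m.map (fun s => csNorm (cl s))).length := by simpa
  rw [List.getD_eq_getElem _ _ h1, List.getD_eq_getElem _ _ h2]
  simp

-- the two loop bodies agree position by position (non-history mode)
theorem nohist_pointwise (cl : String → String) (m : List String) (i : Nat) (hin : i < m.length) :
    [("EOS " :: m.map (fun s => csNorm (cl s))).getD i "", (m.map (fun s => csNorm (cl s))).getD i ""]
      = [if 0 < (i : Int) then csNorm (PySem.List.pyGetD (m.map cl) ((i : Int) - 1) "") else "EOS ",
         csNorm (PySem.List.pyGetD (m.map cl) (i : Int) "")] := by
  rw [nm_getD cl m i hin]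
  match i with
  | 0 => simp
  | (k+1) =>
    rw [if_pos (by omega : (0 : Int) < ((k+1 : Nat) : Int))]
    have hk : ((k+1 : Nat) : Int) - 1 = (k : Int) := by push_cast; ring
    rw [hk, nm_getD cl m k (by omega)]
    simp [List.getD]

-- the two loop bodies agree position by position (history mode)
theorem hist_pointwise (cl : String → String) (m : List String) (i : Nat) :
    [csNorm (((["EOS ", "EOS ", "EOS "] ++ m.map cl).getD i "") ++ ((["EOS ", "EOS ", "EOS "] ++ m.map cl).getD (i+1) "")
        ++ ((["EOS ", "EOS ", "EOS "] ++ m.map cl).getD (i+2) "")),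
     csNorm ((m.map cl).getD i "")]
      = [csNorm (csCtx (m.map cl) ((i : Int) - 3) ++ csCtx (m.map cl) ((i : Int) - 2) ++ csCtx (m.map cl) ((i : Int) - 1)),
         csNorm (PySem.List.pyGetD (m.map cl) (i : Int) "")] := by
  have e1 : ((i : Int) - 2) = ((i + 1 : Nat) : Int) - 3 := by push_cast; ring
  have e2 : ((i : Int) - 1) = ((i + 2 : Nat) : Int) - 3 := by push_cast; ring
  rw [e1, e2, ctx_eq, ctx_eq, ctx_eq, PySem.List.pyGetD_natCast]

-- ===== VERDICT (by name: the statement is the Claim_ definition above) =====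
theorem create_subset_spec : Claim_equal_create_subset := by
  intro sentences history eos_tag _
  unfold Spec_create_subset create_subset create_subset_alt
  have ncs : ∀ s, PySem.Str.join " " (PySem.Str.split₀ s) = csNorm s := fun _ => rfl
  cases history <;> cases eos_tag <;>
    simp only [Bool.false_eq_true, if_true, if_false, ncs, clean_tt, clean_tf, clean_ft, clean_ff]
  · -- history = false, eos_tag = false
    rw [foldl_nohist_idx (fun s => csNorm (csClean false false s)) sentences]
    rw [List.length_map, revloop sentences.length]
    simp only [List.nil_append]
    exact List.map_congr_left fun i hi =>
      nohist_pointwise (csClean false false) sentences i (List.mem_range.mp hi)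
  · -- history = false, eos_tag = true
    rw [foldl_nohist_idx (fun s => csNorm (csClean false true s)) sentences]
    rw [List.length_map, revloop sentences.length]
    simp only [List.nil_append]
    exact List.map_congr_left fun i hi =>
      nohist_pointwise (csClean false true) sentences i (List.mem_range.mp hi)
  · -- history = true, eos_tag = false
    rw [foldl_hist_idx (csClean true false) sentences]
    rw [List.length_map, revloop sentences.length]
    simp only [List.nil_append]
    exact List.map_congr_left fun i _ => hist_pointwise (csClean true false) sentences i
  · -- history = true, eos_tag = true
    rw [foldl_hist_idx (csClean true true) sentences]
    rw [List.length_map, revloop sentences.length]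
    simp only [List.nil_append]
    exact List.map_congr_left fun i _ => hist_pointwise (csClean true true) sentences i
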